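-- pv_equiv track=rewrite | github.com/musman2012/amd-segmentation-opencv-flask | app/testcv.py | find_starting_row_fluid
-- ===== SOURCE A (Python) =====
-- def find_starting_row_fluid(ilm_dict, counter):
-- 	if counter in ilm_dict:
-- 		starting_row = ilm_dict[counter] + 15
-- 		return starting_row
-- 	else:
-- 		for i in range(10):
-- 			if counter - i in ilm_dict:
-- 				starting_row = ilm_dict[counter - i]
-- 				return starting_row
--
-- 			elif counter + i in ilm_dict:
-- 				starting_row = ilm_dict[counter + i]
-- 				return starting_row
--
-- 	return -999
-- ===== SOURCE B (Python) =====
-- def find_starting_row_fluid(ilm_dict, counter):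
--     if counter in ilm_dict:
--         return ilm_dict[counter] + 15
--     candidates = [k for k in ilm_dict if abs(k - counter) <= 9]
--     if not candidates:
--         return -999
--     nearest = min(candidates, key=lambda k: (abs(k - counter), k))
--     return ilm_dict[nearest]
-- ===== Notes on version B (the rewrite author's own statement) =====
-- stated objective: alternative
-- what changed: A probes the dict outward at fixed offsets counter-i/counter+i for i in 0..9 and returns the first hit; B instead makes one pass over the keys, filtering those within distance 9 and taking the minimum by (distance, key), which reproduces A's nearest-key choice and lower-key tie-break.
import Mathlib
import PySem

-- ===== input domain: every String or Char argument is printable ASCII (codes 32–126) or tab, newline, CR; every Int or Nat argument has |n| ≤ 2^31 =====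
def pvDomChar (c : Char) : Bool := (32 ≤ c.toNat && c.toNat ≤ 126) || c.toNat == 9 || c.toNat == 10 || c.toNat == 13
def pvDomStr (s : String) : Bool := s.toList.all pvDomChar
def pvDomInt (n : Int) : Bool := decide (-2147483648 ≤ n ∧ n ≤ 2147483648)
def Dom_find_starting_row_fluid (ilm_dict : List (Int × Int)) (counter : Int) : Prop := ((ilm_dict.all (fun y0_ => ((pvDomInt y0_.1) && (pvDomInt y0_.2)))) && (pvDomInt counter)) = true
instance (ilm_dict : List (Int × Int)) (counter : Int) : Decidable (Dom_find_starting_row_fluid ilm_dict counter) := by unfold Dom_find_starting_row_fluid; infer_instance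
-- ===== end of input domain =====

-- B replaces A's outward offset-probing loop (i = 0..9, try counter-i then counter+i) by a
-- single pass: filter the keys within distance 9 and take the min by (distance, key); same
-- exact values, a genuinely different traversal (alternative decomposition, no speed claim).

-- ===== PORT A =====
-- the 'for i in range(10)' loop with early return: fuel counts the remaining iterations
def findA_probe (d : PySem.Dict Int Int) (counter : Int) (i : Int) : Nat → Int
  | 0 => -999
  | n + 1 =>
    if d.contains (counter - i) then d.getD (counter - i) 0
    else if d.contains (counter + i) then d.getD (counter + i) 0
    else findA_probe d counter (i + 1) n

def find_starting_row_fluid (ilm_dict : List (Int × Int)) (counter : Int) : Int :=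
  let d := PySem.Dict.mk ilm_dict
  if d.contains counter then d.getD counter 0 + 15
  else findA_probe d counter 0 10

-- ===== PORT B =====
def find_starting_row_fluid_alt (ilm_dict : List (Int × Int)) (counter : Int) : Int :=
  let d := PySem.Dict.mk ilm_dict
  if d.contains counter then d.getD counter 0 + 15
  else
    let candidates := d.keys.filter (fun k => decide (|k - counter| ≤ 9))
    match PySem.List.min2? candidates (fun k => |k - counter|) (fun k => k) with
    | none => -999
    | some nearest => d.getD nearest 0

-- ===== PRECONDITION & SPEC =====
def Spec_find_starting_row_fluid (ilm_dict : List (Int × Int)) (counter : Int) (out : Int) : Prop := out = find_starting_row_fluid_alt ilm_dict counter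
instance (ilm_dict : List (Int × Int)) (counter : Int) (out : Int) : Decidable (Spec_find_starting_row_fluid ilm_dict counter out) := by unfold Spec_find_starting_row_fluid; infer_instance

-- ===== CLAIM (what is proved, stated in full; the proofs are below) =====
def Claim_equal_find_starting_row_fluid : Prop := ∀ (ilm_dict : List (Int × Int)) (counter : Int), Dom_find_starting_row_fluid ilm_dict counter → Spec_find_starting_row_fluid ilm_dict counter (find_starting_row_fluid ilm_dict counter)

-- ===== LEMMAS AND PROOFS =====

-- the step function of min2? with identity second key, specialised to Int
def min2Step (f : Int → Int) (acc : Option Int) (x : Int) : Option Int :=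
  match acc with
  | none => some x
  | some m => if (decide (f x < f m) || !decide (f m < f x) && decide (x < m)) = true
              then some x else some m

lemma min2?_eq_foldl (f : Int → Int) (xs : List Int) :
    PySem.List.min2? xs f (fun k => k) = List.foldl (min2Step f) none xs := by
  unfold PySem.List.min2?
  apply List.foldl_ext
  intro acc x _
  cases acc <;> rfl

lemma min2_foldl_ne_none (f : Int → Int) :
    ∀ (xs : List Int) (a : Int), List.foldl (min2Step f) (some a) xs ≠ none := by
  intro xs
  induction xs with
  | nil => intro a h; simp at h
  | cons x t ih =>
    intro a
    simp only [List.foldl_cons, min2Step]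
    split <;> apply ih

-- invariant of min2?'s foldl: the result is lex-minimal (by (f ·, ·)) among acc and the list
lemma min2_foldl_spec (f : Int → Int) :
    ∀ (xs : List Int) (a m : Int),
      List.foldl (min2Step f) (some a) xs = some m →
      (m = a ∨ m ∈ xs) ∧ (f m < f a ∨ (f m = f a ∧ m ≤ a)) ∧
        ∀ y ∈ xs, f m < f y ∨ (f m = f y ∧ m ≤ y) := by
  intro xs
  induction xs with
  | nil =>
    intro a m h
    simp only [List.foldl_nil, Option.some.injEq] at h
    subst h
    exact ⟨Or.inl rfl, Or.inr ⟨rfl, le_refl _⟩, by simp⟩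
  | cons x t ih =>
    intro a m h
    simp only [List.foldl_cons] at h
    by_cases hcond : (decide (f x < f a) || !decide (f a < f x) && decide (x < a)) = true
    · rw [show min2Step f (some a) x = some x by simp [min2Step, hcond]] at h
      obtain ⟨hmem, hx, hall⟩ := ih x m h
      simp only [Bool.or_eq_true, Bool.and_eq_true, Bool.not_eq_true', decide_eq_true_eq,
        decide_eq_false_iff_not] at hcond
      refine ⟨?_, ?_, ?_⟩
      · rcases hmem with h' | h' <;> simp [h']
      · rcases hx with h1 | h1 <;> rcases hcond with h2 | h2 <;> omega
      · intro y hy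
        rcases List.mem_cons.mp hy with rfl | hy
        · exact hx
        · exact hall y hy
    · rw [show min2Step f (some a) x = some a by simp only [min2Step, if_neg hcond]] at h
      obtain ⟨hmem, ha, hall⟩ := ih a m h
      simp only [Bool.or_eq_true, Bool.and_eq_true, Bool.not_eq_true', decide_eq_true_eq,
        decide_eq_false_iff_not, not_or, not_and] at hcond
      refine ⟨?_, ha, ?_⟩
      · rcases hmem with h' | h' <;> simp [h']
      · intro y hy
        rcases List.mem_cons.mp hy with rfl | hy
        · obtain ⟨hc1, hc2⟩ := hcond
          rcases ha with h1 | h1 <;> by_cases h2 : f a < f y <;> simp [h2] at hc2 <;> omega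
        · exact hall y hy

lemma min2?_none_iff (f : Int → Int) (xs : List Int) :
    PySem.List.min2? xs f (fun k => k) = none ↔ xs = [] := by
  rw [min2?_eq_foldl]
  cases xs with
  | nil => simp
  | cons x t =>
    simp only [List.foldl_cons]
    constructor
    · intro h
      rw [show min2Step f none x = some x from rfl] at h
      exact absurd h (min2_foldl_ne_none f t x)
    · intro h; exact absurd h (by simp)

lemma min2?_spec (f : Int → Int) (xs : List Int) (m : Int)
    (h : PySem.List.min2? xs f (fun k => k) = some m) :
    m ∈ xs ∧ ∀ y ∈ xs, f m < f y ∨ (f m = f y ∧ m ≤ y) := by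
  rw [min2?_eq_foldl] at h
  cases xs with
  | nil => simp at h
  | cons x t =>
    simp only [List.foldl_cons] at h
    rw [show min2Step f none x = some x from rfl] at h
    obtain ⟨hmem, hx, hall⟩ := min2_foldl_spec f t x m h
    refine ⟨?_, ?_⟩
    · rcases hmem with h' | h' <;> simp [h']
    · intro y hy
      rcases List.mem_cons.mp hy with rfl | hy
      · exact hx
      · exact hall y hy

-- A's probe loop returns -999 when no offset within the remaining fuel hits
lemma findA_probe_miss (d : PySem.Dict Int Int) (c : Int) :
    ∀ (n : Nat) (i : Int),
      (∀ j : Nat, j < n → d.contains (c - (i + j)) = false ∧ d.contains (c + (i + j)) = false) →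
      findA_probe d c i n = -999 := by
  intro n
  induction n with
  | zero => intro i _; simp [findA_probe]
  | succ n ih =>
    intro i hmiss
    have h0 := hmiss 0 (by omega)
    simp only [Nat.cast_zero, add_zero] at h0
    simp only [findA_probe, h0.1, h0.2, Bool.false_eq_true, if_false]
    apply ih
    intro j hj
    have hshift : (i + 1) + (j : Int) = i + ((j + 1 : Nat) : Int) := by push_cast; ring
    rw [hshift]
    exact hmiss (j + 1) (by omega)

-- A's probe loop finds the first hit, at offset dk, preferring counter - dk
lemma findA_probe_hit (d : PySem.Dict Int Int) (c : Int) :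
    ∀ (n : Nat) (i : Int) (dk : Nat), dk < n →
      (∀ j : Nat, j < dk → d.contains (c - (i + j)) = false ∧ d.contains (c + (i + j)) = false) →
      (d.contains (c - (i + dk)) = true ∨ d.contains (c + (i + dk)) = true) →
      findA_probe d c i n =
        if d.contains (c - (i + dk)) then d.getD (c - (i + dk)) 0 else d.getD (c + (i + dk)) 0 := by
  intro n
  induction n with
  | zero => intro i dk h; omega
  | succ n ih =>
    intro i dk hlt hmiss hhit
    cases dk with
    | zero =>
      simp only [Nat.cast_zero, add_zero] at hhit ⊢
      cases h1 : d.contains (c - i) with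
      | true => simp [findA_probe, h1]
      | false =>
        have h2 : d.contains (c + i) = true := by
          rcases hhit with h | h
          · rw [h1] at h; cases h
          · exact h
        simp [findA_probe, h1, h2]
    | succ dk =>
      have h0 := hmiss 0 (by omega)
      simp only [Nat.cast_zero, add_zero] at h0
      have hshift : ∀ j : Nat, (i + 1) + (j : Int) = i + ((j + 1 : Nat) : Int) := by
        intro j; push_cast; ring
      simp only [findA_probe, h0.1, h0.2, Bool.false_eq_true, if_false]
      have hmiss' : ∀ j : Nat, j < dk →
          d.contains (c - ((i + 1) + j)) = false ∧ d.contains (c + ((i + 1) + j)) = false := by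
        intro j hj
        rw [hshift j]
        exact hmiss (j + 1) (by omega)
      have hhit' : d.contains (c - ((i + 1) + (dk : Int))) = true ∨
          d.contains (c + ((i + 1) + (dk : Int))) = true := by
        rw [hshift dk]; exact hhit
      rw [ih (i + 1) dk (by omega) hmiss' hhit', hshift dk]

-- ===== VERDICT (by name: the statement is the Claim_ definition above) =====
theorem find_starting_row_fluid_spec : Claim_equal_find_starting_row_fluid := by
  intro l c _
  unfold Spec_find_starting_row_fluid find_starting_row_fluid find_starting_row_fluid_alt
  set d := PySem.Dict.mk l with hd
  by_cases hc : d.contains c = true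
  · simp [hc]
  · simp only [hc, Bool.false_eq_true, if_false]
    set f : Int → Int := fun k => |k - c| with hf
    set cands := d.keys.filter (fun k => decide (|k - c| ≤ 9)) with hcands
    have hmemc : ∀ k : Int, k ∈ cands ↔ (d.contains k = true ∧ |k - c| ≤ 9) := by
      intro k
      simp [hcands, List.mem_filter, PySem.Dict.contains_iff_mem_keys]
    cases hmin : PySem.List.min2? cands f (fun k => k) with
    | none =>
      -- no key within distance 9: every probe misses
      have hempty : cands = [] := (min2?_none_iff f cands).mp hmin
      have hnot : ∀ x : Int, |x - c| ≤ 9 → d.contains x = false := by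
        intro x hx
        cases h : d.contains x with
        | false => rfl
        | true =>
          exfalso
          have : x ∈ cands := (hmemc x).mpr ⟨h, hx⟩
          rw [hempty] at this; simp at this
      rw [findA_probe_miss d c 10 0 ?_]
      intro j hj
      constructor
      · apply hnot
        rw [show c - (0 + (j : Int)) - c = -(j : Int) by ring, abs_neg, Int.abs_natCast]
        omega
      · apply hnot
        rw [show c + (0 + (j : Int)) - c = (j : Int) by ring, Int.abs_natCast]
        omega
    | some k =>
      obtain ⟨hk_mem, hk_min⟩ := min2?_spec f cands k hmin
      rw [hmemc] at hk_mem
      obtain ⟨hk_in, hk_near⟩ := hk_mem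
      have hkc : k ≠ c := fun h => hc (h ▸ hk_in)
      set dk : Nat := (k - c).natAbs with hdk
      have habs_k : |k - c| = (dk : Int) := by rw [hdk, Int.abs_eq_natAbs]
      rw [habs_k] at hk_near
      have hdkpos : 0 < dk := by
        have : k - c ≠ 0 := fun h => hkc (by omega)
        omega
      have hk_min' : ∀ y ∈ cands, (dk : Int) < |y - c| ∨ ((dk : Int) = |y - c| ∧ k ≤ y) := by
        intro y hy
        have := hk_min y hy
        simp only [hf] at this
        rw [habs_k] at this
        exact this
      have hmiss : ∀ j : Nat, j < dk →
          d.contains (c - (0 + j)) = false ∧ d.contains (c + (0 + j)) = false := by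
        intro j hj
        have hclose : ∀ x : Int, |x - c| = (j : Int) → d.contains x = false := by
          intro x hx
          cases h : d.contains x with
          | false => rfl
          | true =>
            exfalso
            have hin : x ∈ cands := (hmemc x).mpr ⟨h, by rw [hx]; omega⟩
            rcases hk_min' x hin with h1 | h1 <;> rw [hx] at h1 <;> omega
        constructor
        · exact hclose _ (by
            rw [show c - (0 + (j : Int)) - c = -(j : Int) by ring, abs_neg, Int.abs_natCast])
        · exact hclose _ (by
            rw [show c + (0 + (j : Int)) - c = (j : Int) by ring, Int.abs_natCast])
      have hkside : k = c - (dk : Int) ∨ k = c + (dk : Int) := by omega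
      have hhit : d.contains (c - (0 + (dk : Int))) = true ∨
          d.contains (c + (0 + (dk : Int))) = true := by
        rcases hkside with h | h
        · left; rw [zero_add, ← h]; exact hk_in
        · right; rw [zero_add, ← h]; exact hk_in
      rw [findA_probe_hit d c 10 0 dk (by omega) hmiss hhit]
      simp only [zero_add]
      rcases hkside with hk_lo | hk_up
      · -- k is the lower key: the probe's first branch fires and returns it
        have hpos : d.contains (c - (dk : Int)) = true := by rw [← hk_lo]; exact hk_in
        rw [hk_lo]
        simp [hpos]
      · -- k is the upper key: the lower side is empty (else the min's tie-break picks it)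
        have hneg2 : d.contains (c - (dk : Int)) = false := by
          cases h : d.contains (c - (dk : Int)) with
          | false => rfl
          | true =>
            exfalso
            have habs2 : |c - (dk : Int) - c| = (dk : Int) := by
              rw [show c - (dk : Int) - c = -(dk : Int) by ring, abs_neg, Int.abs_natCast]
            have hin : (c - (dk : Int)) ∈ cands := (hmemc _).mpr ⟨h, by rw [habs2]; omega⟩
            rcases hk_min' _ hin with h1 | h1 <;> rw [habs2] at h1 <;> omega
        rw [hk_up]
        simp [hneg2]
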